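-- pv_equiv track=rewrite | github.com/pypi-data/pypi-mirror-115 | packages/musamusa-textref/musamusa_textref-0.2.2.tar.gz/musamusa_textref-0.2.2/musamusa_textref/textrefbaseclass.py | _cmp_monoref_vs_monoref_almost_eq
-- ===== SOURCE A (Python) =====
-- def _cmp_monoref_vs_monoref_almost_eq(monoref1,
--                                       monoref2):
--     """
--         TextRefBaseClass._cmp_monoref_vs_monoref_almost_eq()
--
--         Internal method: we check that all elements items in monoref1 and monoref2
--                          are equal (typevalue+value) EXCEPT THE LAST ITEM
--                          whose typevalue must be the same but whose value
--                          may differ.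
--                          The length of monoref1 and monoref2 can't differ:
--                          if length differs, this method returns False
--
--         Some examples:
--                     book.3.4 vs another_book.1.4 : res=False
--                     book.3.4 vs book.1.4         : res=False
--                     book.1.4 vs book.1.4         : res=True
--                     book.1.4 vs book.1.5         : res=True
--         ___________________________________________________________________
--
--         ARGUMENTS:
--         o  monoref1: the first monoref to be compared
--         o  monoref2: the second monoref to be compared
--
--         RETURNED VALUE: (bool)True if <monoref1> and <monoref2> are "almost" equal.
--     """
--     len_monoref2 = len(monoref2)
--
--     if len(monoref1) != len_monoref2:
--         return False
--
--     res = True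
--     for index, item1 in enumerate(monoref1):
--
--         if index >= len_monoref2:
--             break
--
--         item2 = monoref2[index]
--         if item1[0] != item2[0]:
--             res = False
--             break
--
--         if index != len_monoref2-1 and item1[1] != item2[1]:
--             res = False
--             break
--
--     return res
-- ===== SOURCE B (Python) =====
-- def _cmp_monoref_vs_monoref_almost_eq(monoref1, monoref2):
--     # Different strategy: no element-wise pass at all. Build the two typevalue
--     # lists and compare them wholesale, and compare the two prefixes (all but
--     # the last pair) wholesale; the conjunction (with equal lengths) is exactly
--     # "equal everywhere except possibly the last value".
--     if len(monoref1) != len(monoref2):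
--         return False
--     typevalues_match = [typevalue for typevalue, _ in monoref1] \
--         == [typevalue for typevalue, _ in monoref2]
--     prefix_match = monoref1[:-1] == monoref2[:-1]
--     return typevalues_match and prefix_match
-- ===== Notes on version B (the rewrite author's own statement) =====
-- stated objective: simpler
-- what changed: Replaces A's indexed element-wise loop with break/flag logic by two wholesale list comparisons: equality of the extracted typevalue lists and equality of the [:-1] prefix slices, conjoined after the length guard.
import Mathlib
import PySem

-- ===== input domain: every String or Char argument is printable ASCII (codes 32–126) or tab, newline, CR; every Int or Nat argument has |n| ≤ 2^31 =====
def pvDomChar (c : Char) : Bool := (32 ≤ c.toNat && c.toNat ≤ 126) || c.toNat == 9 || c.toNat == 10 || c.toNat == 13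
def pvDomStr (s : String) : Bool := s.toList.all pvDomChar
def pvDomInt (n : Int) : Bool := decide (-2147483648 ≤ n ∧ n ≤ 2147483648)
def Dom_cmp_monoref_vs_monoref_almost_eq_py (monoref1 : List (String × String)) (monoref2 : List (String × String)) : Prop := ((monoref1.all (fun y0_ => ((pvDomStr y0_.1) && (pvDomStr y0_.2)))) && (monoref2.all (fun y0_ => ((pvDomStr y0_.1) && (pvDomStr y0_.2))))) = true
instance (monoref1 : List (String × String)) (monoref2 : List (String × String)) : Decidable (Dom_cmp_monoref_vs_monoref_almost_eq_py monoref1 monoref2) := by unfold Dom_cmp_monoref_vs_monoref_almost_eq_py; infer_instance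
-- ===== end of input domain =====

-- ===== PORT A =====
-- B replaces A's indexed loop with break/flag logic by two wholesale list
-- comparisons (typevalue lists, [:-1] prefix slices) — objective: simpler.
-- loop body of A: 'for index, item1 in enumerate(monoref1)' with breaks, indexing monoref2 by position
def pvALoop (monoref2 : List (String × String)) (len_monoref2 : Nat) : Nat → List (String × String) → Bool
  | _, [] => true
  | index, item1 :: rest =>
    if len_monoref2 ≤ index then true            -- 'if index >= len_monoref2: break' (res still True)
    else
      match PySem.List.pyGet? monoref2 (index : Int) with
      | none => true                              -- unreachable: index < len(monoref2)
      | some item2 =>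
        if item1.1 ≠ item2.1 then false
        else if index ≠ len_monoref2 - 1 ∧ item1.2 ≠ item2.2 then false
        else pvALoop monoref2 len_monoref2 (index + 1) rest

def cmp_monoref_vs_monoref_almost_eq_py (monoref1 : List (String × String)) (monoref2 : List (String × String)) : Bool :=
  let len_monoref2 := monoref2.length
  if monoref1.length ≠ len_monoref2 then false
  else pvALoop monoref2 len_monoref2 0 monoref1

-- ===== PORT B =====
def cmp_monoref_vs_monoref_almost_eq_py_alt (monoref1 : List (String × String)) (monoref2 : List (String × String)) : Bool :=
  if monoref1.length ≠ monoref2.length then false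
  else
    let typevalues_match := (monoref1.map (fun p => p.1)) == (monoref2.map (fun p => p.1))
    let prefix_match := (PySem.List.slice monoref1 none (some (-1))) == (PySem.List.slice monoref2 none (some (-1)))
    typevalues_match && prefix_match

-- ===== PRECONDITION & SPEC =====
def Spec_cmp_monoref_vs_monoref_almost_eq_py (monoref1 : List (String × String)) (monoref2 : List (String × String)) (out : Bool) : Prop := out = cmp_monoref_vs_monoref_almost_eq_py_alt monoref1 monoref2
instance (monoref1 : List (String × String)) (monoref2 : List (String × String)) (out : Bool) : Decidable (Spec_cmp_monoref_vs_monoref_almost_eq_py monoref1 monoref2 out) := by unfold Spec_cmp_monoref_vs_monoref_almost_eq_py; infer_instance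

-- ===== CLAIM (what is proved, stated in full; the proofs are below) =====
def Claim_equal_cmp_monoref_vs_monoref_almost_eq_py : Prop := ∀ (monoref1 : List (String × String)) (monoref2 : List (String × String)), Dom_cmp_monoref_vs_monoref_almost_eq_py monoref1 monoref2 → Spec_cmp_monoref_vs_monoref_almost_eq_py monoref1 monoref2 (cmp_monoref_vs_monoref_almost_eq_py monoref1 monoref2)

-- ===== LEMMAS AND PROOFS =====

-- common characterisation: componentwise equal except the last value, last typevalues equal
def pvAlmost : List (String × String) → List (String × String) → Bool
  | [], _ => true
  | [a], [b] => a.1 == b.1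
  | a :: t1, b :: t2 => (a.1 == b.1 && a.2 == b.2) && pvAlmost t1 t2
  | _, _ => true

lemma pvALoop_eq (t1 : List (String × String)) : ∀ (t2 pre : List (String × String)),
    t1.length = t2.length →
    pvALoop (pre ++ t2) (pre.length + t2.length) pre.length t1 = pvAlmost t1 t2 := by
  induction t1 with
  | nil =>
    intro t2 pre h
    cases t2 with
    | nil => simp [pvALoop, pvAlmost]
    | cons b t2' => simp at h
  | cons a t1' ih =>
    intro t2 pre h
    cases t2 with
    | nil => simp at h
    | cons b t2' =>
      simp only [List.length_cons] at h
      have hget : PySem.List.pyGet? (pre ++ b :: t2') ((pre.length : Nat) : Int) = some b :=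
        PySem.List.pyGet?_append_length pre t2' b
      have hrec : pvALoop ((pre ++ [b]) ++ t2') ((pre ++ [b]).length + t2'.length)
          ((pre ++ [b]).length) t1' = pvAlmost t1' t2' := ih t2' (pre ++ [b]) (by omega)
      have hlist : (pre ++ [b]) ++ t2' = pre ++ b :: t2' := by simp
      have hlen : (pre ++ [b]).length = pre.length + 1 := by simp
      rw [hlist, hlen] at hrec
      cases t2' with
      | nil =>
        cases t1' with
        | nil =>
          simp only [pvALoop, pvAlmost, List.length_cons, List.length_nil]
          rw [if_neg (by omega), hget]
          by_cases hab : a.1 = b.1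
          · simp [hab]
          · simp [hab]
        | cons c t1'' => simp at h
      | cons d t2'' =>
        simp only [pvALoop, pvAlmost, List.length_cons]
        simp only [List.length_cons] at hrec
        rw [if_neg (by omega), hget]
        by_cases hab : a.1 = b.1
        · by_cases hv : a.2 = b.2
          · rw [show pre.length + (t2''.length + 1 + 1) = pre.length + 1 + (t2''.length + 1)
              from by omega]
            simp [hab, hv, hrec]
          · have hcond : pre.length ≠ pre.length + (t2''.length + 1 + 1) - 1 ∧ a.2 ≠ b.2 :=
              ⟨by omega, hv⟩
            simp [hab, hv]
        · simp [hab]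

lemma pvAlt_eq (t1 : List (String × String)) : ∀ (t2 : List (String × String)),
    t1.length = t2.length →
    (((t1.map (fun p => p.1)) == (t2.map (fun p => p.1)))
      && (t1.dropLast == t2.dropLast)) = pvAlmost t1 t2 := by
  induction t1 with
  | nil =>
    intro t2 h
    cases t2 with
    | nil => simp [pvAlmost]
    | cons b t2' => simp at h
  | cons a t1' ih =>
    intro t2 h
    cases t2 with
    | nil => simp at h
    | cons b t2' =>
      simp only [List.length_cons] at h
      cases t1' with
      | nil =>
        cases t2' with
        | nil => simp [pvAlmost]
        | cons d t2'' => simp at h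
      | cons c t1'' =>
        cases t2' with
        | nil => simp at h
        | cons d t2'' =>
          simp only [List.length_cons] at h
          have ihc := ih (d :: t2'') (by simp only [List.length_cons]; omega)
          simp only [pvAlmost, List.map_cons, List.dropLast_cons_of_ne_nil (List.cons_ne_nil c t1''),
            List.dropLast_cons_of_ne_nil (List.cons_ne_nil d t2''), List.cons_beq_cons] at ihc ⊢
          rw [← ihc]
          have hb : (a == b) = (a.1 == b.1 && a.2 == b.2) := rfl
          rw [hb]
          by_cases h1 : a.1 = b.1 <;> by_cases h2 : a.2 = b.2 <;>
            simp [h1, h2, Bool.and_left_comm, Bool.and_assoc, Bool.and_comm]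

-- ===== VERDICT (by name: the statement is the Claim_ definition above) =====
theorem cmp_monoref_vs_monoref_almost_eq_py_spec : Claim_equal_cmp_monoref_vs_monoref_almost_eq_py := by
  intro m1 m2 _dom
  unfold Spec_cmp_monoref_vs_monoref_almost_eq_py
  by_cases hlen : m1.length = m2.length
  · have hA := pvALoop_eq m1 m2 [] hlen
    simp only [List.nil_append, List.length_nil, Nat.zero_add] at hA
    have hB := pvAlt_eq m1 m2 hlen
    rw [cmp_monoref_vs_monoref_almost_eq_py]
    unfold cmp_monoref_vs_monoref_almost_eq_py_alt
    simp only [PySem.List.slice_to_neg_one, hlen, ne_eq, not_true_eq_false, if_false]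
    rw [hA, hB]
  · simp [cmp_monoref_vs_monoref_almost_eq_py, cmp_monoref_vs_monoref_almost_eq_py_alt, hlen]
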